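-- pv_equiv track=rewrite | github.com/ivanwakeup/algorithms | algorithms/prep/microsoft/largest_m_aligned_subset.py | largest_m_aligned_optimal
-- ===== SOURCE A (Python) =====
-- def largest_m_aligned_optimal(A, M):
--     """ find the size of longest subset of A, in which any 2 elements' different is divisible by M """
--     remainders = [0] * M
--     max_size = 0
--     for num in A:
--         remainder = num % M
--         remainders[remainder] += 1
--         max_size = max(max_size, remainders[remainder])
--     return max_size
-- ===== SOURCE B (Python) =====
-- def largest_m_aligned_optimal(A, M):
--     """ find the size of longest subset of A, in which any 2 elements' different is divisible by M """
--     rs = sorted(x % M for x in A)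
--     best = 0
--     run = 0
--     prev = None
--     for r in rs:
--         run = run + 1 if r == prev else 1
--         prev = r
--         best = max(best, run)
--     return best
-- ===== Notes on version B (the rewrite author's own statement) =====
-- stated objective: alternative
-- what changed: Replaces A's remainder-frequency table with a running maximum by a sort-then-scan algorithm: sort the remainders and find the longest run of equal adjacent values, which equals the largest remainder class.
-- crash fix: On M < 0 with nonempty A, A raises IndexError (its [0]*M table is empty) while B returns the largest remainder-class size under Python's negative modulus. — e.g. on largest_m_aligned_optimal([3], -2): A raises IndexError, B returns 1
import Mathlib
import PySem

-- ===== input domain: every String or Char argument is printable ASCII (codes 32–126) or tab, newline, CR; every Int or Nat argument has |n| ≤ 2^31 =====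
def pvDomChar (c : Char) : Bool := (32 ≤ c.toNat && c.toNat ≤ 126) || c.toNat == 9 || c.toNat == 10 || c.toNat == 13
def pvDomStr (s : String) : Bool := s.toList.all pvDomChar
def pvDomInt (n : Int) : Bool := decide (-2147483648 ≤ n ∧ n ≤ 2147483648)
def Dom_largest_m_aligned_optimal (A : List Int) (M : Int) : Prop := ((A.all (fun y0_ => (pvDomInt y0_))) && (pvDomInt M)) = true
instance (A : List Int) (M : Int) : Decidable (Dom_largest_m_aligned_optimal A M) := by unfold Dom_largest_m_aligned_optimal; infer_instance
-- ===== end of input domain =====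

-- B replaces A's remainder-frequency table fused with a running max by a sort-then-scan
-- algorithm: sort the remainders and take the longest run of equal adjacent values (alternative).


-- ===== PORT A =====
-- remainders = [0]*M; for num in A: r = num % M; remainders[r] += 1; max_size = max(max_size, remainders[r])
def largest_m_aligned_optimal (A : List Int) (M : Int) : Int :=
  let st := A.foldl (fun st num =>
    let r := PySem.Int.mod num M
    let c := PySem.List.pyGetD st.1 r 0 + 1
    (PySem.List.pySetD st.1 r c, max st.2 c))
    (List.replicate M.toNat (0 : Int), (0 : Int))
  st.2

-- ===== PORT B =====
-- rs = sorted(x % M for x in A); then scan rs keeping (best, run, prev): longest run of equals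
def largest_m_aligned_optimal_alt (A : List Int) (M : Int) : Int :=
  let rs := PySem.List.sorted (A.map (fun x => PySem.Int.mod x M)) (fun x => x) false
  (rs.foldl (fun st r =>
    let run := if some r = st.2.2 then st.2.1 + 1 else 1
    (max st.1 run, run, some r)) ((0 : Int), (0 : Int), (none : Option Int))).1

-- ===== PRECONDITION & SPEC =====
-- Pre_ excludes exactly the inputs on which A raises: with A nonempty, M = 0 gives ZeroDivisionError
-- and M < 0 gives IndexError (the [0]*M table is empty); A returns on everything Pre_ admits.
def Pre_largest_m_aligned_optimal (A : List Int) (M : Int) : Prop := 0 < M ∨ A = []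
instance (A : List Int) (M : Int) : Decidable (Pre_largest_m_aligned_optimal A M) := by unfold Pre_largest_m_aligned_optimal; infer_instance
def pvWitness_largest_m_aligned_optimal : List Int × Int := ([3, 7, 10, 4], 3)

-- On M < 0 with nonempty A, A raises IndexError while B returns the largest remainder-class size
-- under Python's negative modulus.
def Raises_largest_m_aligned_optimal (A : List Int) (M : Int) : Prop := M < 0 ∧ A ≠ []
instance (A : List Int) (M : Int) : Decidable (Raises_largest_m_aligned_optimal A M) := by unfold Raises_largest_m_aligned_optimal; infer_instance
def pvRaiseWitness_largest_m_aligned_optimal : List Int × Int := ([3], -2)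
def pvRaiseWitnessOut_largest_m_aligned_optimal : Int := 1

def Spec_largest_m_aligned_optimal (A : List Int) (M : Int) (out : Int) : Prop := out = largest_m_aligned_optimal_alt A M
instance (A : List Int) (M : Int) (out : Int) : Decidable (Spec_largest_m_aligned_optimal A M out) := by unfold Spec_largest_m_aligned_optimal; infer_instance

-- ===== CLAIM (what is proved, stated in full; the proofs are below) =====
def Claim_equal_largest_m_aligned_optimal : Prop := ∀ (A : List Int) (M : Int), Dom_largest_m_aligned_optimal A M → Pre_largest_m_aligned_optimal A M → Spec_largest_m_aligned_optimal A M (largest_m_aligned_optimal A M)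
def Claim_raises_largest_m_aligned_optimal : Prop := (∀ (A : List Int) (M : Int), Dom_largest_m_aligned_optimal A M → Raises_largest_m_aligned_optimal A M → ¬ Pre_largest_m_aligned_optimal A M) ∧ (Dom_largest_m_aligned_optimal (pvRaiseWitness_largest_m_aligned_optimal.1) (pvRaiseWitness_largest_m_aligned_optimal.2) ∧ Raises_largest_m_aligned_optimal (pvRaiseWitness_largest_m_aligned_optimal.1) (pvRaiseWitness_largest_m_aligned_optimal.2) ∧ largest_m_aligned_optimal_alt (pvRaiseWitness_largest_m_aligned_optimal.1) (pvRaiseWitness_largest_m_aligned_optimal.2) = pvRaiseWitnessOut_largest_m_aligned_optimal)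

-- ===== LEMMAS AND PROOFS =====

-- the residue-count table of the residue list l (spec for A's remainders array)
def pvTbl (l : List Int) (M : Int) : List Int :=
  (List.range M.toNat).map (fun i => (l.count ((i : Nat) : Int) : Int))

-- the max count over the table (spec for A's max_size)
def pvS (l : List Int) (M : Int) : Int := (pvTbl l M).foldl max 0

-- max multiplicity of any value in l (spec for B's longest equal run after sorting)
def pvMC (l : List Int) : Int := (l.map (fun v => (l.count v : Int))).foldl max 0

-- B's scan step
def pvStep (st : Int × Int × Option Int) (r : Int) : Int × Int × Option Int :=
  let run := if some r = st.2.2 then st.2.1 + 1 else 1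
  (max st.1 run, run, some r)

theorem pv_foldl_max_init (t : List Int) (a b : Int) :
    t.foldl max (max a b) = max (t.foldl max a) b := by
  induction t generalizing a with
  | nil => rfl
  | cons y t ih =>
    simp only [List.foldl_cons]
    rw [show max (max a b) y = max (max a y) b by omega, ih]

theorem pv_foldl_max_set (u : List Int) (j : Nat) (hj : j < u.length) (w : Int)
    (hw : u[j] ≤ w) (a : Int) : (u.set j w).foldl max a = max (u.foldl max a) w := by
  induction u generalizing j a with
  | nil => simp at hj
  | cons x t ih =>
    cases j with
    | zero =>
      simp only [List.set_cons_zero, List.foldl_cons]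
      simp only [List.getElem_cons_zero] at hw
      rw [show max a w = max (max a x) w by omega, pv_foldl_max_init]
    | succ j =>
      simp only [List.set_cons_succ, List.foldl_cons]
      exact ih j (by simpa using hj) (by simpa using hw) (max a x)

theorem pv_foldl_max_le (u : List Int) (a b : Int) (ha : a ≤ b) (h : ∀ x ∈ u, x ≤ b) :
    u.foldl max a ≤ b := by
  induction u generalizing a with
  | nil => exact ha
  | cons x t ih =>
    exact ih (max a x) (max_le ha (h x (by simp))) (fun y hy => h y (by simp [hy]))

theorem pv_foldl_max_replicate (m : Nat) (a c : Int) :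
    (List.replicate m c).foldl max a = if m = 0 then a else max a c := by
  induction m generalizing a with
  | zero => rfl
  | succ m ih =>
    simp only [List.replicate_succ, List.foldl_cons, ih]
    by_cases h : m = 0
    · subst h; simp
    · rw [if_neg h, if_neg (Nat.succ_ne_zero m), show max (max a c) c = max a c by omega]

theorem pvTbl_length (l : List Int) (M : Int) : (pvTbl l M).length = M.toNat := by
  simp [pvTbl]

theorem pvTbl_getElem (l : List Int) (M : Int) (j : Nat) (hj : j < M.toNat) :
    (pvTbl l M)[j]'(by simp [pvTbl_length, hj]) = (l.count ((j : Nat) : Int) : Int) := by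
  simp [pvTbl]

theorem pvTbl_append (l : List Int) (M r : Int) (h0 : 0 ≤ r) (hM : r < M) :
    pvTbl (l ++ [r]) M = (pvTbl l M).set r.toNat ((l.count r : Int) + 1) := by
  apply List.ext_getElem
  · simp [pvTbl_length]
  · intro i h1 h2
    rw [List.getElem_set]
    have hi : i < M.toNat := by simpa [pvTbl_length] using h1
    rw [pvTbl_getElem _ _ _ hi, pvTbl_getElem _ _ _ hi]
    split_ifs with h
    · subst h
      rw [show ((r.toNat : Nat) : Int) = r by omega]
      simp [List.count_append]
    · have : ((i : Nat) : Int) ≠ r := by omega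
      simp [List.count_append, Ne.symm this]

theorem pvA_loop (A : List Int) (M : Int) (hM : 0 < M) :
    A.foldl (fun st num =>
      let r := PySem.Int.mod num M
      let c := PySem.List.pyGetD st.1 r 0 + 1
      (PySem.List.pySetD st.1 r c, max st.2 c))
      (List.replicate M.toNat (0 : Int), (0 : Int))
    = (pvTbl (A.map (fun n => PySem.Int.mod n M)) M, pvS (A.map (fun n => PySem.Int.mod n M)) M) := by
  induction A using List.reverseRecOn with
  | nil =>
    have h1 : pvTbl [] M = List.replicate M.toNat 0 := by
      simp [pvTbl]
    have h2 : pvS ([] : List Int) M = 0 := by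
      rw [pvS, h1, pv_foldl_max_replicate]
      split_ifs <;> omega
    simp [h1, h2]
  | append_singleton l x ih =>
    rw [List.foldl_append, ih]
    simp only [List.foldl_cons, List.foldl_nil, List.map_append, List.map_cons, List.map_nil]
    have h0' : 0 ≤ PySem.Int.mod x M := PySem.Int.mod_nonneg x hM
    have hrM' : PySem.Int.mod x M < M := PySem.Int.mod_lt x hM
    generalize hq : PySem.Int.mod x M = r at *
    have h0 : 0 ≤ r := h0'
    have hrM : r < M := hrM'
    set rs := l.map (fun n => PySem.Int.mod n M) with hrs
    have hjr : r.toNat < (pvTbl rs M).length := by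
      rw [pvTbl_length]; omega
    have hcast : ((r.toNat : Nat) : Int) = r := by omega
    have hgetE : (pvTbl rs M)[r.toNat]'hjr = (rs.count r : Int) := by
      rw [pvTbl_getElem rs M r.toNat (by omega), hcast]
    have hget : PySem.List.pyGetD (pvTbl rs M) r 0 = (rs.count r : Int) := by
      rw [← hcast, PySem.List.pyGetD_natCast, List.getD_eq_getElem _ _ hjr, hcast, hgetE]
    have hset : PySem.List.pySetD (pvTbl rs M) r ((rs.count r : Int) + 1)
        = pvTbl (rs ++ [r]) M := by
      rw [PySem.List.pySetD_of_nonneg _ _ h0, pvTbl_append rs M r h0 hrM]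
    have hmax : pvS (rs ++ [r]) M = max (pvS rs M) ((rs.count r : Int) + 1) := by
      simp only [pvS]
      rw [pvTbl_append rs M r h0 hrM,
        pv_foldl_max_set _ _ hjr _ (by rw [hgetE]; omega)]
    simp only [hget, hset, hmax]

-- B-side: scanning a block of k copies of v with prev = v extends the run by k
theorem pvGo_replicate (k : Nat) (t : List Int) (v best run : Int) (h : run ≤ best) :
    (List.replicate k v ++ t).foldl pvStep (best, run, some v)
      = t.foldl pvStep (max best (run + k), run + k, some v) := by
  induction k generalizing best run with
  | zero =>
    simp only [List.replicate, List.nil_append, Nat.cast_zero, add_zero]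
    rw [show max best run = best by omega]
  | succ k ih =>
    simp only [List.replicate_succ, List.cons_append, List.foldl_cons]
    rw [show pvStep (best, run, some v) v = (max best (run + 1), run + 1, some v) by
      simp [pvStep]]
    rw [ih _ _ (by omega)]
    have h1 : max (max best (run + 1)) (run + 1 + (k : Int)) = max best (run + ((k + 1 : Nat) : Int)) := by
      push_cast; omega
    have h2 : run + 1 + (k : Int) = run + ((k + 1 : Nat) : Int) := by push_cast; omega
    rw [h1, h2]

-- elements after the leading block of x's in a sorted tail differ from x
theorem pv_dropWhile_ne (t : List Int) (x : Int) (hp : t.Pairwise (· ≤ ·))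
    (hx : ∀ y ∈ t, x ≤ y) :
    ∀ y ∈ t.dropWhile (fun y => y == x), y ≠ x := by
  induction t with
  | nil => simp
  | cons a s ih =>
    by_cases ha : a = x
    · subst ha
      rw [List.dropWhile_cons_of_pos (by simp)]
      exact ih (List.Pairwise.sublist (List.sublist_cons_self a s) hp)
        (fun y hy => hx y (by simp [hy]))
    · rw [List.dropWhile_cons_of_neg (by simpa using ha)]
      intro y hy
      rcases List.mem_cons.1 hy with rfl | hy
      · exact ha
      · have h1 : x ≤ a := hx a (by simp)
        have h2 : a ≤ y := (List.pairwise_cons.1 hp).1 y hy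
        intro h; subst h; omega

theorem pv_takeWhile_replicate (t : List Int) (x : Int) :
    t.takeWhile (fun y => y == x) = List.replicate (t.takeWhile (fun y => y == x)).length x := by
  apply List.eq_replicate_of_mem
  intro y hy
  have := List.mem_takeWhile_imp hy
  simpa using this

theorem pvMC_nonneg (l : List Int) : 0 ≤ pvMC l :=
  (PySem.List.le_foldl_max _ 0).1

theorem pvMC_cons (x : Int) (k : Nat) (dw : List Int)
    (hdw : ∀ y ∈ dw, y ≠ x) :
    pvMC (x :: (List.replicate k x ++ dw)) = max ((k : Int) + 1) (pvMC dw) := by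
  have hl : x :: (List.replicate k x ++ dw) = List.replicate (k + 1) x ++ dw := by
    simp [List.replicate_succ]
  rw [hl]
  have hcx : (List.replicate (k + 1) x ++ dw).count x = k + 1 := by
    rw [List.count_append, List.count_replicate, List.count_eq_zero.2 (fun h => hdw x h rfl)]
    simp
  have hcy : ∀ y ∈ dw, (List.replicate (k + 1) x ++ dw).count y = dw.count y := by
    intro y hy
    rw [List.count_append, List.count_replicate, if_neg (by simpa using (hdw y hy).symm)]
    · simp
  unfold pvMC
  rw [List.map_append, List.foldl_append]
  have hmap1 : (List.replicate (k + 1) x).map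
      (fun v => (((List.replicate (k + 1) x ++ dw).count v : Nat) : Int))
      = List.replicate (k + 1) ((k : Int) + 1) := by
    rw [List.map_replicate, hcx]; push_cast; rfl
  have hmap2 : dw.map (fun v => (((List.replicate (k + 1) x ++ dw).count v : Nat) : Int))
      = dw.map (fun v => ((dw.count v : Nat) : Int)) := by
    apply List.map_congr_left
    intro y hy; rw [hcy y hy]
  rw [hmap1, hmap2, pv_foldl_max_replicate, if_neg (Nat.succ_ne_zero k),
    pv_foldl_max_init]
  omega

-- main scan invariant: on a sorted list whose elements all differ from prev,
-- the scan returns max best (max multiplicity)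
theorem pvGo_main (n : Nat) : ∀ (t : List Int), t.length ≤ n → t.Pairwise (· ≤ ·) →
    ∀ (best run : Int) (prev : Option Int), 0 ≤ best → run ≤ best →
    (∀ x ∈ t, some x ≠ prev) →
    (t.foldl pvStep (best, run, prev)).1 = max best (pvMC t) := by
  induction n with
  | zero =>
    intro t ht _ best run prev hb _ _
    rw [List.length_eq_zero_iff.1 (Nat.le_zero.1 ht)]
    simp only [List.foldl_nil]
    have : pvMC ([] : List Int) = 0 := rfl
    omega
  | succ n ih =>
    intro t ht hp best run prev hb hrb hne
    cases t with
    | nil =>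
      simp only [List.foldl_nil]
      have : pvMC ([] : List Int) = 0 := rfl
      omega
    | cons x t₁ =>
      set tw := t₁.takeWhile (fun y => y == x) with htw
      set dw := t₁.dropWhile (fun y => y == x) with hdw
      set k := tw.length with hk
      have hsplit : t₁ = tw ++ dw := (List.takeWhile_append_dropWhile).symm
      have hrep : tw = List.replicate k x := pv_takeWhile_replicate t₁ x
      have hp₁ : t₁.Pairwise (· ≤ ·) := (List.pairwise_cons.1 hp).2
      have hxle : ∀ y ∈ t₁, x ≤ y := (List.pairwise_cons.1 hp).1
      have hdne : ∀ y ∈ dw, y ≠ x := pv_dropWhile_ne t₁ x hp₁ hxle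
      have hpd : dw.Pairwise (· ≤ ·) :=
        List.Pairwise.sublist (hdw ▸ List.dropWhile_sublist _) hp₁
      have hld : dw.length ≤ n := by
        have h1 : dw.length ≤ t₁.length := List.Sublist.length_le (hdw ▸ List.dropWhile_sublist _)
        have h2 : (x :: t₁).length ≤ n + 1 := ht
        simp only [List.length_cons] at h2
        omega
      have hxprev : some x ≠ prev := hne x (by simp)
      have hstep : pvStep (best, run, prev) x = (max best 1, 1, some x) := by
        simp only [pvStep]
        rw [if_neg hxprev]
      rw [List.foldl_cons, hstep, hsplit, hrep, pvGo_replicate k dw x _ _ (by omega)]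
      have hres := ih dw hld hpd (max (max best 1) (1 + k)) (1 + k) (some x)
        (by omega) (by omega) (fun y hy h => hdne y hy (by simpa using h))
      rw [hres, pvMC_cons x k dw hdne]
      omega

-- B equals the max multiplicity of the residue list
theorem pvB_eq_MC (A : List Int) (M : Int) :
    largest_m_aligned_optimal_alt A M
      = pvMC (PySem.List.sorted (A.map (fun x => PySem.Int.mod x M)) (fun x => x) false) := by
  unfold largest_m_aligned_optimal_alt
  set srs := PySem.List.sorted (A.map (fun x => PySem.Int.mod x M)) (fun x => x) false with hsrs
  have hp : srs.Pairwise (· ≤ ·) := by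
    have := PySem.List.sorted_pairwise (A.map (fun x => PySem.Int.mod x M)) (fun x => x)
    simpa using this
  have := pvGo_main srs.length srs (le_refl _) hp 0 0 none (le_refl _) (le_refl _)
    (by intro x _ h; simp at h)
  have hmax : max (0 : Int) (pvMC srs) = pvMC srs := by
    have := pvMC_nonneg srs; omega
  calc (srs.foldl (fun st r =>
          let run := if some r = st.2.2 then st.2.1 + 1 else 1
          (max st.1 run, run, some r)) ((0:Int), (0:Int), (none : Option Int))).1
      = (srs.foldl pvStep ((0:Int), (0:Int), (none : Option Int))).1 := rfl
    _ = max 0 (pvMC srs) := this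
    _ = pvMC srs := hmax

-- max multiplicity equals the table max when all elements lie in [0, M)
theorem pvMC_eq_pvS (s l : List Int) (M : Int)
    (hperm : s.Perm l)
    (hmem : ∀ v ∈ l, 0 ≤ v ∧ v < M) :
    pvMC s = pvS l M := by
  have hcount : ∀ v : Int, s.count v = l.count v := fun v => hperm.count_eq v
  have hmem' : ∀ v ∈ s, 0 ≤ v ∧ v < M := fun v hv => hmem v (hperm.mem_iff.1 hv)
  apply le_antisymm
  · apply pv_foldl_max_le _ _ _ (PySem.List.le_foldl_max (pvTbl l M) 0).1
    intro c hc
    obtain ⟨v, hv, rfl⟩ := List.mem_map.1 hc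
    obtain ⟨h0, hM⟩ := hmem' v hv
    rw [hcount v]
    have : ((l.count v : Nat) : Int) ∈ pvTbl l M := by
      apply List.mem_map.2
      exact ⟨v.toNat, List.mem_range.2 (by omega),
        by rw [show ((v.toNat : Nat) : Int) = v by omega]⟩
    exact (PySem.List.le_foldl_max (pvTbl l M) 0).2 _ this
  · apply pv_foldl_max_le _ _ _ (pvMC_nonneg s)
    intro c hc
    obtain ⟨i, _, rfl⟩ := List.mem_map.1 hc
    by_cases hi : ((i : Nat) : Int) ∈ s
    · have : ((s.count ((i : Nat) : Int) : Nat) : Int)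
          ∈ s.map (fun v => ((s.count v : Nat) : Int)) := List.mem_map.2 ⟨_, hi, rfl⟩
      rw [← hcount]
      exact (PySem.List.le_foldl_max _ 0).2 _ this
    · have hi' : ((i : Nat) : Int) ∉ l := fun h => hi (hperm.mem_iff.2 h)
      rw [List.count_eq_zero.2 hi']
      exact pvMC_nonneg s

-- ===== VERDICT (by name: the statement is the Claim_ definition above) =====
theorem largest_m_aligned_optimal_spec : Claim_equal_largest_m_aligned_optimal := by
  intro A M _ hpre
  unfold Spec_largest_m_aligned_optimal
  rcases hpre with hM | rfl
  · rw [pvB_eq_MC A M]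
    rw [pvMC_eq_pvS _ (A.map (fun x => PySem.Int.mod x M)) M
      (PySem.List.sorted_perm _ _ _)
      (by rintro v hv
          obtain ⟨x, _, rfl⟩ := List.mem_map.1 hv
          exact ⟨PySem.Int.mod_nonneg x hM, PySem.Int.mod_lt x hM⟩)]
    simp only [largest_m_aligned_optimal, pvA_loop A M hM]
  · rfl

@[simp] theorem largest_m_aligned_optimal_raises : Claim_raises_largest_m_aligned_optimal := by
  unfold Claim_raises_largest_m_aligned_optimal
  exact ⟨by rintro A M _ ⟨hM, hA⟩ (h | rfl) <;> [omega; exact hA rfl], by decide⟩
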